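-- pv_equiv track=rewrite | github.com/brillantescene/Coding_Test | Inflearn/Section5/largest-num.py | solution
-- ===== SOURCE A (Python) =====
-- def solution(nums, m):
--     stack = []
--
--     for num in nums:
--         while stack and m > 0 and stack[-1] < num:
--             stack.pop()
--             m -= 1
--         stack.append(num)
--
--     if m != 0:
--         stack = stack[:-m]
--     return stack
-- ===== SOURCE B (Python) =====
-- def solution(nums, m):
--     lst = list(nums)
--     for _ in range(m):
--         if not lst:
--             break
--         i = None
--         for j in range(len(lst) - 1):
--             if lst[j] < lst[j + 1]:
--                 i = j
--                 break
--         if i is None: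
--             lst.pop()
--         else:
--             lst.pop(i)
--     return lst
-- ===== Notes on version B (the rewrite author's own statement) =====
-- stated objective: alternative
-- what changed: Replaces the single-pass stack-with-budget greedy by m rounds of in-place deletion: each round rescans the list and deletes the first element smaller than its successor (or the last element if the list is non-increasing), stopping early when the list is empty.
-- outside the precondition, e.g. on solution([3, 1], -1): A returns [3], B returns [3, 1]
import Mathlib
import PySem

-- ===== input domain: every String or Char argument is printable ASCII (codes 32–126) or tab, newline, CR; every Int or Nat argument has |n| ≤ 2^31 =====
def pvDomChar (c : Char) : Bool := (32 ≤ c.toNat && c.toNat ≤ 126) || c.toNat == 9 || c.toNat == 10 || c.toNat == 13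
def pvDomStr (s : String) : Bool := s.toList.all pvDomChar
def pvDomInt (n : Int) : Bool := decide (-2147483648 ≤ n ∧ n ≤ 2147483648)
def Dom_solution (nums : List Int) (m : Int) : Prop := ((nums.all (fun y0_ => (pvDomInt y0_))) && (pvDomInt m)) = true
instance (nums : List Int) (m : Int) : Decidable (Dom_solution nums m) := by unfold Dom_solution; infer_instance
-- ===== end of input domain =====

-- B replaces A's budgeted stack pass by m repeated first-rise deletions (alternative
-- decomposition, same return value on the natural domain 0 ≤ m; no speed claim).

-- ===== PORT A =====
-- The Python stack is kept reversed (head = Python stack[-1]); the while loop is popLoop.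
def popLoop (stack : List Int) (m : Int) (num : Int) : List Int × Int :=
  match stack with
  | [] => ([], m)
  | t :: rest => if m > 0 ∧ t < num then popLoop rest (m - 1) num else (t :: rest, m)

def runA (s : List Int × Int) (nums : List Int) : List Int × Int :=
  nums.foldl (fun s num =>
    let p := popLoop s.1 s.2 num
    (num :: p.1, p.2)) s

-- the tail of A: `if m != 0: stack = stack[:-m]`; `return stack`
def finishA (s : List Int × Int) : List Int :=
  let stack := s.1.reverse
  if s.2 ≠ 0 then PySem.List.slice stack none (some (-s.2)) else stack

def solution (nums : List Int) (m : Int) : List Int :=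
  finishA (runA ([], m) nums)

-- ===== PORT B =====
-- the inner scan: first index j with lst[j] < lst[j+1]
def firstRise : List Int → Option Nat
  | a :: b :: rest => if a < b then some 0 else (firstRise (b :: rest)).map (· + 1)
  | _ => none

-- one pass of the loop body: lst.pop() / lst.pop(i)
def delStep (lst : List Int) : List Int :=
  match firstRise lst with
  | none => lst.dropLast
  | some i => lst.eraseIdx i

-- `for _ in range(m): if not lst: break; …`
def bLoop : Nat → List Int → List Int
  | 0, lst => lst
  | k + 1, lst => if lst = [] then lst else bLoop k (delStep lst)

def solution_alt (nums : List Int) (m : Int) : List Int :=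
  bLoop m.toNat nums

-- ===== PRECONDITION & SPEC =====
-- Pre_ excludes negative m with |m| < len(nums): a negative removal count is outside
-- the task's natural domain, and on that unspecified corner the two readings diverge —
-- A's `stack[:-m]` slice returns a proper prefix of nums, while B's `range(m)` loop
-- runs zero times and returns nums unchanged; every other input is admitted.
def Pre_solution (nums : List Int) (m : Int) : Prop := 0 ≤ m ∨ (nums.length : Int) ≤ -m
instance (nums : List Int) (m : Int) : Decidable (Pre_solution nums m) := by unfold Pre_solution; infer_instance
def pvWitness_solution : List Int × Int := ([4, 2, 5, 1], 2)

def Spec_solution (nums : List Int) (m : Int) (out : List Int) : Prop := out = solution_alt nums m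
instance (nums : List Int) (m : Int) (out : List Int) : Decidable (Spec_solution nums m out) := by unfold Spec_solution; infer_instance

-- ===== CLAIM (what is proved, stated in full; the proofs are below) =====
def Claim_equal_solution : Prop := ∀ (nums : List Int) (m : Int), Dom_solution nums m → Pre_solution nums m → Spec_solution nums m (solution nums m)

-- ===== LEMMAS AND PROOFS =====

theorem delStep_nil : delStep [] = [] := rfl

theorem delStep_cons {x c : Int} (rest : List Int) (h : ¬ x < c) :
    delStep (x :: c :: rest) = x :: delStep (c :: rest) := by
  have he : firstRise (x :: c :: rest) = (firstRise (c :: rest)).map (· + 1) := by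
    rw [show firstRise (x :: c :: rest)
        = if x < c then some 0 else (firstRise (c :: rest)).map (· + 1) from rfl]
    simp [h]
  unfold delStep
  rw [he]
  cases hr : firstRise (c :: rest) with
  | none => simp
  | some i => simp [List.eraseIdx]

theorem bLoop_eq_iterate : ∀ (k : Nat) (lst : List Int), bLoop k lst = delStep^[k] lst := by
  intro k
  induction k with
  | zero => intro lst; rfl
  | succ k ih =>
    intro lst
    by_cases h : lst = []
    · subst h
      rw [show bLoop (k + 1) ([] : List Int) = [] from by simp [bLoop],
        Function.iterate_fixed delStep_nil]
    · rw [show bLoop (k + 1) lst = bLoop k (delStep lst) from by simp [bLoop, h], ih,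
        Function.iterate_succ_apply]

theorem popLoop_no_pop {r : List Int} {b x : Int} (h : ∀ t ∈ r.head?, ¬ t < x) :
    popLoop r b x = (r, b) := by
  cases r with
  | nil => rfl
  | cons t rest =>
    have := h t (by simp)
    simp [popLoop, this]

theorem trim_pos (l : List Int) (b : Int) (hb : 0 < b) :
    finishA (l, b) = l.reverse.take (l.reverse.length - b.toNat) := by
  unfold finishA
  rw [if_pos (show b ≠ 0 by omega)]
  rw [show -b = -((b.toNat : Nat) : Int) by omega,
    PySem.List.slice_to_neg_natCast l.reverse b.toNat (by omega)]

theorem keyG : ∀ (xs : List Int) (x : Int) (r : List Int) (b : Int), 0 ≤ b →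
    (∀ t ∈ r.head?, ¬ t < x) →
    finishA (runA (r, b + 1) (x :: xs)) = finishA (runA (r, b) (delStep (x :: xs))) := by
  intro xs
  induction xs with
  | nil =>
    intro x r b hb hcond
    have h1 : runA (r, b + 1) [x] = (x :: r, b + 1) := by
      simp [runA, popLoop_no_pop hcond]
    have h2 : delStep [x] = [] := rfl
    rw [h1, h2, trim_pos (x :: r) (b + 1) (by omega), List.reverse_cons,
      show runA (r, b) ([] : List Int) = (r, b) from rfl]
    rcases lt_or_eq_of_le hb with hb0 | hb0
    · rw [trim_pos r b hb0]
      have hn : (r.reverse ++ [x]).length - (b + 1).toNat = r.reverse.length - b.toNat := by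
        simp; omega
      rw [hn, List.take_append_of_le_length (by omega)]
    · subst hb0
      rw [show finishA (r, (0 : Int)) = r.reverse from by simp [finishA]]
      have hn : (r.reverse ++ [x]).length - ((0 : Int) + 1).toNat = r.reverse.length := by
        simp
      rw [hn, List.take_append_of_le_length (le_refl _), List.take_length]
  | cons c rest ih =>
    intro x r b hb hcond
    by_cases hxc : x < c
    · -- first rise at the head: both runs reach the same state before folding rest
      have hdel : delStep (x :: c :: rest) = c :: rest := by
        unfold delStep firstRise; simp [hxc, List.eraseIdx]
      rw [hdel]
      have hstep1 : runA (r, b + 1) (x :: c :: rest)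
          = runA (c :: (popLoop r b c).1, (popLoop r b c).2) rest := by
        simp only [runA, List.foldl]
        rw [popLoop_no_pop hcond]
        have : popLoop (x :: r) (b + 1) c = popLoop r b c := by
          simp [popLoop, hxc, show (b:Int) + 1 > 0 by omega]
        simp [this]
      have hstep2 : runA (r, b) (c :: rest)
          = runA (c :: (popLoop r b c).1, (popLoop r b c).2) rest := by
        simp [runA, List.foldl]
      rw [hstep1, hstep2]
    · -- no rise at the head: push x in both runs and use the IH
      have hdel : delStep (x :: c :: rest) = x :: delStep (c :: rest) := delStep_cons rest hxc
      rw [hdel]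
      have hstep1 : runA (r, b + 1) (x :: c :: rest) = runA (x :: r, b + 1) (c :: rest) := by
        simp only [runA, List.foldl]
        rw [popLoop_no_pop hcond]
      have hstep2 : runA (r, b) (x :: delStep (c :: rest))
          = runA (x :: r, b) (delStep (c :: rest)) := by
        simp only [runA, List.foldl]
        rw [popLoop_no_pop hcond]
      rw [hstep1, hstep2]
      exact ih c (x :: r) b hb (by
        intro t ht
        simp only [List.head?_cons, Option.mem_def, Option.some.injEq] at ht
        subst ht
        exact hxc)

theorem runA_nonpos {b : Int} (hb : b ≤ 0) :
    ∀ (nums : List Int) (r : List Int), runA (r, b) nums = (nums.reverse ++ r, b) := by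
  intro nums
  induction nums with
  | nil => intro r; simp [runA]
  | cons x xs ih =>
    intro r
    have : popLoop r b x = (r, b) := by
      cases r with
      | nil => rfl
      | cons t rest => simp [popLoop]; omega
    simp only [runA, List.foldl, this]
    have := ih (x :: r)
    simp only [runA] at this
    rw [this]
    simp

theorem solution_toNat : ∀ (k : Nat) (nums : List Int), solution nums (k : Int) = delStep^[k] nums := by
  intro k
  induction k with
  | zero =>
    intro nums
    simp [solution, runA_nonpos (le_refl (0 : Int)), finishA]
  | succ k ih =>
    intro nums
    have hcast : ((k + 1 : Nat) : Int) = (k : Int) + 1 := by push_cast; ring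
    cases nums with
    | nil =>
      simp only [solution, hcast]
      have h1 : runA ([], (k : Int) + 1) [] = ([], (k : Int) + 1) := by simp [runA]
      rw [h1]
      have : finishA (([] : List Int).reverse, (k : Int) + 1) = [] := by
        rw [trim_pos _ _ (by omega)]; simp
      simp only [List.reverse_nil] at this
      rw [this, Function.iterate_fixed delStep_nil]
    | cons x xs =>
      have hkey := keyG xs x [] (k : Int) (by omega) (by simp)
      simp only [solution, hcast]
      rw [hkey]
      have : finishA (runA ([], (k : Int)) (delStep (x :: xs))) = solution (delStep (x :: xs)) (k : Int) := rfl
      rw [this, ih]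
      exact (Function.iterate_succ_apply delStep k (x :: xs)).symm

-- ===== VERDICT (by name: the statement is the Claim_ definition above) =====
theorem solution_spec : Claim_equal_solution := by
  intro nums m _ hpre
  unfold Spec_solution solution_alt
  rw [bLoop_eq_iterate]
  by_cases hm0 : 0 ≤ m
  · have hm : m = (m.toNat : Int) := (Int.toNat_of_nonneg hm0).symm
    rw [hm]
    exact solution_toNat m.toNat nums
  · -- here m < 0 and len(nums) ≤ -m: A trims nothing (stack[:-m] keeps all of stack)
    have hlen : (nums.length : Int) ≤ -m := by
      rcases hpre with h | h
      · omega
      · exact h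
    have hrun := runA_nonpos (show m ≤ 0 by omega) nums []
    unfold solution
    rw [hrun]
    unfold finishA
    simp only [List.append_nil, List.reverse_reverse]
    rw [if_pos (show m ≠ 0 by omega),
      show -m = (((-m).toNat : Nat) : Int) by omega,
      PySem.List.slice_to_natCast,
      List.take_of_length_le (by omega),
      show m.toNat = 0 by omega,
      Function.iterate_zero_apply]
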